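-- pv_equiv track=rewrite | github.com/1xiaosongz/lll | 5860.py | simple_extract_2
-- ===== SOURCE A (Python) =====
-- def simple_extract_2(arr):
--     """
--     简化版本：执行两次差值计算并提取元素
--     """
--
--     def one_pass(current_arr):
--         extracted = []
--         i = 0
--         while i < len(current_arr) - 1:
--             if  current_arr[i + 1] - current_arr[i] < 430:
--                 extracted.append(current_arr[i + 1])
--                 current_arr.pop(i + 1)
--             else:
--                 i += 1
--         return extracted
--
--     remaining = arr.copy()
--     first_extracted = one_pass(remaining)
--     second_extracted = one_pass(remaining)
--
--     return remaining, first_extracted + second_extracted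
-- ===== SOURCE B (Python) =====
-- def simple_extract_2(arr):
--     """
--     Single linear scan: keep an element as the current base; any following
--     element within 430 of the base is extracted, otherwise it is kept and
--     becomes the new base.  After this pass consecutive kept elements differ
--     by at least 430, so A's second pass never extracts anything.
--     """
--     remaining = []
--     extracted = []
--     base = None
--     for x in arr:
--         if base is not None and x - base < 430:
--             extracted.append(x)
--         else:
--             remaining.append(x)
--             base = x
--     return remaining, extracted
-- ===== Notes on version B (the rewrite author's own statement) =====
-- stated objective: faster
-- what changed: Replaced the two pop-based O(n^2) sweeps with one linear scan that tracks the current base element; the second sweep is provably a no-op since kept elements are already >=430 apart.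
import Mathlib
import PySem

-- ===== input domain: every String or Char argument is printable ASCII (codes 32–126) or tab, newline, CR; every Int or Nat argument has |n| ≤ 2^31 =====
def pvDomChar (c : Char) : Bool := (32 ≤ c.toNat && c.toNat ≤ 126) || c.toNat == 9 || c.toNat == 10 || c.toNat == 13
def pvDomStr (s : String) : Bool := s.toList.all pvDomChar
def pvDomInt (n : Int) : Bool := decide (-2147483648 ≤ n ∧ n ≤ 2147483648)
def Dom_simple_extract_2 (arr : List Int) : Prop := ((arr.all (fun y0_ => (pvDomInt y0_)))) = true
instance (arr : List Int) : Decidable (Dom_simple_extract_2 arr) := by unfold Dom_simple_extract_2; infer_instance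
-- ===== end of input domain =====

-- B replaces A's two quadratic pop-based sweeps by one linear scan tracking the current base.

-- ===== PORT A =====
-- literal port of A's inner `one_pass` while-loop: state = (current_arr, i, extracted);
-- `current_arr.pop(i+1)` is List.eraseIdx (i+1); indices are always in range (guard h).
def onePassA (cur : List Int) (i : Nat) (ext : List Int) : List Int × List Int :=
  if h : i + 1 < cur.length then
    if cur.getD (i+1) 0 - cur.getD i 0 < 430 then
      onePassA (cur.eraseIdx (i+1)) i (ext ++ [cur.getD (i+1) 0])
    else
      onePassA cur (i+1) ext
  else
    (cur, ext)
termination_by cur.length - i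
decreasing_by
  · have : (cur.eraseIdx (i+1)).length = cur.length - 1 := by
      simp [List.length_eraseIdx, h]
    omega
  · omega

def simple_extract_2 (arr : List Int) : List Int × List Int :=
  let p1 := onePassA arr 0 []
  let p2 := onePassA p1.1 0 []
  (p2.1, p1.2 ++ p2.2)

-- ===== PORT B =====
-- literal port of Source B: one fold over arr with state (base?, remaining, extracted)
def altStep (st : Option Int × List Int × List Int) (x : Int) :
    Option Int × List Int × List Int :=
  match st with
  | (b?, rem, ext) =>
    match b? with
    | some b => if x - b < 430 then (some b, rem, ext ++ [x]) else (some x, rem ++ [x], ext)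
    | none => (some x, rem ++ [x], ext)

def simple_extract_2_alt (arr : List Int) : List Int × List Int :=
  let st := arr.foldl altStep (none, [], [])
  (st.2.1, st.2.2)

-- ===== PRECONDITION & SPEC =====
def Spec_simple_extract_2 (arr : List Int) (out : List Int × List Int) : Prop := out = simple_extract_2_alt arr
instance (arr : List Int) (out : List Int × List Int) : Decidable (Spec_simple_extract_2 arr out) := by unfold Spec_simple_extract_2; infer_instance

-- ===== CLAIM (what is proved, stated in full; the proofs are below) =====
def Claim_equal_simple_extract_2 : Prop := ∀ (arr : List Int), Dom_simple_extract_2 arr → Spec_simple_extract_2 arr (simple_extract_2 arr)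

-- ===== LEMMAS AND PROOFS =====

-- reference recursion: given base b, split xs into (kept, extracted)
def g (b : Int) (xs : List Int) : List Int × List Int :=
  match xs with
  | [] => ([], [])
  | x :: xs =>
    if x - b < 430 then
      let p := g b xs; (p.1, x :: p.2)
    else
      let p := g x xs; (x :: p.1, p.2)

lemma onePassA_eq_g (xs : List Int) : ∀ (p : List Int) (b : Int) (ext : List Int),
    onePassA (p ++ b :: xs) p.length ext
      = (p ++ b :: (g b xs).1, ext ++ (g b xs).2) := by
  induction xs with
  | nil =>
    intro p b ext
    rw [onePassA]
    simp [g]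
  | cons x xs ih =>
    intro p b ext
    rw [onePassA]
    have hlen : p.length + 1 < (p ++ b :: x :: xs).length := by simp
    have hi : (p ++ b :: x :: xs).getD p.length 0 = b := by
      simp [List.getD]
    have hi1 : (p ++ b :: x :: xs).getD (p.length + 1) 0 = x := by
      have : p.length + 1 = (p ++ [b]).length := by simp
      rw [show p ++ b :: x :: xs = (p ++ [b]) ++ x :: xs by simp, this]
      simp [List.getD]
    rw [dif_pos hlen, hi, hi1]
    by_cases hc : x - b < 430
    · rw [if_pos hc]
      have herase : (p ++ b :: x :: xs).eraseIdx (p.length + 1) = p ++ b :: xs := by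
        have : p.length + 1 = (p ++ [b]).length := by simp
        rw [show p ++ b :: x :: xs = (p ++ [b]) ++ x :: xs by simp, this,
          List.eraseIdx_append_of_length_le (le_refl _)]
        simp
      rw [herase, ih p b (ext ++ [x])]
      simp [g, hc]
    · rw [if_neg hc]
      have hsplit : p ++ b :: x :: xs = (p ++ [b]) ++ x :: xs := by simp
      have hl : p.length + 1 = (p ++ [b]).length := by simp
      rw [hsplit, hl, ih (p ++ [b]) x ext]
      simp [g, hc]

-- separation predicate: each element is ≥ base+430 of its predecessor
def sep (b : Int) : List Int → Prop
  | [] => True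
  | x :: xs => 430 ≤ x - b ∧ sep x xs

lemma g_sep (xs : List Int) : ∀ b : Int, sep b (g b xs).1 := by
  induction xs with
  | nil => intro b; simp [g, sep]
  | cons x xs ih =>
    intro b
    by_cases hc : x - b < 430
    · simpa [g, hc] using ih b
    · simpa [g, hc, sep] using ⟨by omega, ih x⟩

lemma g_of_sep (xs : List Int) : ∀ b : Int, sep b xs → g b xs = (xs, []) := by
  induction xs with
  | nil => intro b _; simp [g]
  | cons x xs ih =>
    intro b hs
    obtain ⟨h1, h2⟩ := hs
    have hc : ¬ x - b < 430 := by omega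
    simp [g, hc, ih x h2]

lemma foldl_altStep (xs : List Int) :
    ∀ (b : Int) (rem ext : List Int),
      ((xs.foldl altStep (some b, rem, ext)).2.1,
       (xs.foldl altStep (some b, rem, ext)).2.2)
        = (rem ++ (g b xs).1, ext ++ (g b xs).2) := by
  induction xs with
  | nil => intro b rem ext; simp [g]
  | cons x xs ih =>
    intro b rem ext
    by_cases hc : x - b < 430
    · simp only [List.foldl_cons, altStep, if_pos hc]
      rw [ih b rem (ext ++ [x])]
      simp [g, hc]
    · simp only [List.foldl_cons, altStep, if_neg hc]
      rw [ih x (rem ++ [x]) ext]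
      simp [g, hc]

-- ===== VERDICT (by name: the statement is the Claim_ definition above) =====
theorem simple_extract_2_spec : Claim_equal_simple_extract_2 := by
  intro arr _
  unfold Spec_simple_extract_2 simple_extract_2 simple_extract_2_alt
  cases arr with
  | nil => simp [onePassA]
  | cons a as =>
    have h1 := onePassA_eq_g as [] a []
    have h2 := onePassA_eq_g (g a as).1 [] a []
    have h3 := foldl_altStep as a [a] []
    rw [g_of_sep _ a (g_sep as a)] at h2
    simp only [List.nil_append, List.length_nil] at h1 h2
    simp only [h1, h2, List.foldl_cons, altStep]
    rw [Prod.ext_iff] at h3 ⊢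
    refine ⟨?_, ?_⟩
    · simpa using h3.1.symm
    · simpa using h3.2.symm
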